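-- pv_equiv track=rewrite | github.com/LeoLetellier/ASP-SAR | raster_more/remove_topo_ramp.py | define_chunks
-- ===== SOURCE A (Python) =====
-- def define_chunks(dimensions, target_size):
--     """ Chunks are squared divisions of a grid each defined by [xoff, yoff, xsize, ysize]
--     """
--     chunks = []
--     # Number of full sized chunks
--     full_x = dimensions[0] // target_size[0]
--     full_y = dimensions[1] // target_size[1]
--     # Residuals for padding chunks
--     trunc_x = dimensions[0] % target_size[0]
--     trunc_y = dimensions[1] % target_size[1]
--
--     # Full sized chunks
--     for kx in range(full_x):
--         for ky in range(full_y):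
--             chunks.append([kx * target_size[0], ky * target_size[1], target_size[0], target_size[1]])
--
--     # Pad in x
--     if trunc_x > 0:
--         for ky in range(full_y):
--             chunks.append([full_x * target_size[0], ky * target_size[1], trunc_x, target_size[1]])
--
--     # Pad in y
--     if trunc_y > 0:
--         for kx in range(full_x):
--             chunks.append([kx * target_size[0], full_y * target_size[1], target_size[0], trunc_y])
--
--     # Pad the corner
--     if trunc_x > 0 and trunc_y > 0:
--         chunks.append([full_x * target_size[0], full_y * target_size[1], trunc_x, trunc_y])
--
--     return chunks
-- ===== SOURCE B (Python) =====
-- def define_chunks(dimensions, target_size):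
--     """ Chunks are squared divisions of a grid each defined by [xoff, yoff, xsize, ysize]
--     """
--     tx, ty = target_size
--     full_x, trunc_x = divmod(dimensions[0], tx)
--     full_y, trunc_y = divmod(dimensions[1], ty)
--     xs = [(kx * tx, tx) for kx in range(full_x)]
--     if trunc_x > 0:
--         xs.append((full_x * tx, trunc_x))
--     if not xs:
--         return []
--     ys_full = [(ky * ty, ty) for ky in range(full_y)]
--     ys_pad = [(full_y * ty, trunc_y)] if trunc_y > 0 else []
--     return [[xoff, yoff, xsize, ysize]
--             for ys in (ys_full, ys_pad)
--             for (xoff, xsize) in xs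
--             for (yoff, ysize) in ys]
-- ===== Notes on version B (the rewrite author's own statement) =====
-- stated objective: simpler
-- what changed: Precomputes segment tables (xoff,xsize) and (yoff,ysize) once and emits all chunks with a single product comprehension over (full-y rows, then the y-pad row), replacing A's four separate conditional loop blocks.
import Mathlib
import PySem

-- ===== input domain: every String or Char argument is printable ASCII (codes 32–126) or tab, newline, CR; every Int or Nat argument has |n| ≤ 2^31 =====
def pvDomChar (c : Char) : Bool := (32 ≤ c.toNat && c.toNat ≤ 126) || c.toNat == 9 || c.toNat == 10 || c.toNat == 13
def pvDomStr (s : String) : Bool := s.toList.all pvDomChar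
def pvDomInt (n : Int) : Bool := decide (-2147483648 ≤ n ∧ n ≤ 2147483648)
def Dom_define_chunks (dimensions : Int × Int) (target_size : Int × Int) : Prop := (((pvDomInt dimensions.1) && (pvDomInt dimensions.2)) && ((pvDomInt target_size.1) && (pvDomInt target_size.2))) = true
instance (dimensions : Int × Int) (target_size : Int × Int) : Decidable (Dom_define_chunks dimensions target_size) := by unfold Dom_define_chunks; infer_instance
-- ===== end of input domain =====

-- B replaces A's four conditional append-loops by precomputed x/y segment tables and one
-- product comprehension over them (objective: simpler).

-- ===== PORT A =====
def define_chunks (dimensions : Int × Int) (target_size : Int × Int) : List (List Int) :=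
  let full_x := PySem.Int.floordiv dimensions.1 target_size.1
  let full_y := PySem.Int.floordiv dimensions.2 target_size.2
  let trunc_x := PySem.Int.mod dimensions.1 target_size.1
  let trunc_y := PySem.Int.mod dimensions.2 target_size.2
  let chunks : List (List Int) :=
    (PySem.List.pyRange 0 full_x 1).foldl (fun acc kx =>
      (PySem.List.pyRange 0 full_y 1).foldl (fun acc ky =>
        acc ++ [[kx * target_size.1, ky * target_size.2, target_size.1, target_size.2]]) acc) []
  let chunks :=
    if trunc_x > 0 then
      (PySem.List.pyRange 0 full_y 1).foldl (fun acc ky =>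
        acc ++ [[full_x * target_size.1, ky * target_size.2, trunc_x, target_size.2]]) chunks
    else chunks
  let chunks :=
    if trunc_y > 0 then
      (PySem.List.pyRange 0 full_x 1).foldl (fun acc kx =>
        acc ++ [[kx * target_size.1, full_y * target_size.2, target_size.1, trunc_y]]) chunks
    else chunks
  if trunc_x > 0 ∧ trunc_y > 0 then
    chunks ++ [[full_x * target_size.1, full_y * target_size.2, trunc_x, trunc_y]]
  else chunks

-- ===== PORT B =====
def define_chunks_alt (dimensions : Int × Int) (target_size : Int × Int) : List (List Int) :=
  let tx := target_size.1
  let ty := target_size.2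
  let full_x := PySem.Int.floordiv dimensions.1 tx
  let trunc_x := PySem.Int.mod dimensions.1 tx
  let full_y := PySem.Int.floordiv dimensions.2 ty
  let trunc_y := PySem.Int.mod dimensions.2 ty
  let xs : List (Int × Int) := (PySem.List.pyRange 0 full_x 1).map (fun kx => (kx * tx, tx))
  let xs := if trunc_x > 0 then xs ++ [(full_x * tx, trunc_x)] else xs
  if xs = [] then [] else
  let ys_full : List (Int × Int) := (PySem.List.pyRange 0 full_y 1).map (fun ky => (ky * ty, ty))
  let ys_pad : List (Int × Int) := if trunc_y > 0 then [(full_y * ty, trunc_y)] else []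
  [ys_full, ys_pad].flatMap (fun ys =>
    xs.flatMap (fun x => ys.map (fun y => [x.1, y.1, x.2, y.2])))

-- ===== PRECONDITION & SPEC =====
-- A raises ZeroDivisionError when either target size is 0; excluded.
def Pre_define_chunks (dimensions : Int × Int) (target_size : Int × Int) : Prop :=
  target_size.1 ≠ 0 ∧ target_size.2 ≠ 0
instance (dimensions : Int × Int) (target_size : Int × Int) : Decidable (Pre_define_chunks dimensions target_size) := by unfold Pre_define_chunks; infer_instance
def pvWitness_define_chunks : (Int × Int) × (Int × Int) := ((5, 7), (2, 3))

def Spec_define_chunks (dimensions : Int × Int) (target_size : Int × Int) (out : List (List Int)) : Prop := out = define_chunks_alt dimensions target_size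
instance (dimensions : Int × Int) (target_size : Int × Int) (out : List (List Int)) : Decidable (Spec_define_chunks dimensions target_size out) := by unfold Spec_define_chunks; infer_instance

-- ===== CLAIM (what is proved, stated in full; the proofs are below) =====
def Claim_equal_define_chunks : Prop := ∀ (dimensions : Int × Int) (target_size : Int × Int), Dom_define_chunks dimensions target_size → Pre_define_chunks dimensions target_size → Spec_define_chunks dimensions target_size (define_chunks dimensions target_size)

-- ===== LEMMAS AND PROOFS =====

-- ===== VERDICT (by name: the statement is the Claim_ definition above) =====
theorem define_chunks_spec : Claim_equal_define_chunks := by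
  intro d t _ _
  unfold Spec_define_chunks define_chunks define_chunks_alt
  simp only [PySem.List.foldl_append_singleton_eq_map, PySem.List.foldl_append_eq_flatMap,
    List.flatMap_cons, List.flatMap_nil, List.append_nil, List.nil_append]
  by_cases hx : PySem.Int.mod d.1 t.1 > 0 <;>
  by_cases hy : PySem.Int.mod d.2 t.2 > 0 <;>
  simp [hx, hy, List.flatMap_append, List.flatMap_map, List.map_map, List.append_assoc, Function.comp_def] <;> (try exact List.map_eq_flatMap ..) <;> split_ifs with h <;> simp [h, List.map_eq_flatMap]
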